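-- pv_equiv track=rewrite | github.com/ThatMatin/TransNovo | tokenizer/aa.py | lower_to_modifications
-- ===== SOURCE A (Python) =====
-- def lower_to_modifications(peptide_sequence):
--     modifications = []
--
--     peptide_list = list(peptide_sequence)
--
--     for i, aa in enumerate(peptide_list):
--         if aa == 'c':
--             modifications.append((i, 'C', 'CAM'))
--             peptide_list[i] = 'C'
--         elif aa == 'm':
--             modifications.append((i, 'M', 'Oxidation'))
--             peptide_list[i] = 'M'
--
--     return ''.join(peptide_list), modifications
-- ===== SOURCE B (Python) =====
-- def lower_to_modifications(peptide_sequence):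
--     s = ''.join(peptide_sequence)
--     result = s.replace('c', 'C').replace('m', 'M')
--
--     def positions(ch):
--         out, i = [], s.find(ch)
--         while i != -1:
--             out.append(i)
--             i = s.find(ch, i + 1)
--         return out
--
--     cs = [(i, 'C', 'CAM') for i in positions('c')]
--     ms = [(i, 'M', 'Oxidation') for i in positions('m')]
--
--     # merge the two index-sorted streams back into one list ordered by position
--     mods, a, b = [], 0, 0
--     while a < len(cs) and b < len(ms):
--         if cs[a][0] < ms[b][0]:
--             mods.append(cs[a]); a += 1
--         else:
--             mods.append(ms[b]); b += 1
--     mods.extend(cs[a:])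
--     mods.extend(ms[b:])
--     return result, mods
-- ===== Notes on version B (the rewrite author's own statement) =====
-- stated objective: alternative
-- what changed: Replaces A's single index-mutating Python loop with staged passes: chained str.replace for the uppercased string, two find-based scans collecting the positions of each modified residue separately, and a two-pointer merge of the two index-sorted tuple lists into the modifications list.
import Mathlib
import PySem

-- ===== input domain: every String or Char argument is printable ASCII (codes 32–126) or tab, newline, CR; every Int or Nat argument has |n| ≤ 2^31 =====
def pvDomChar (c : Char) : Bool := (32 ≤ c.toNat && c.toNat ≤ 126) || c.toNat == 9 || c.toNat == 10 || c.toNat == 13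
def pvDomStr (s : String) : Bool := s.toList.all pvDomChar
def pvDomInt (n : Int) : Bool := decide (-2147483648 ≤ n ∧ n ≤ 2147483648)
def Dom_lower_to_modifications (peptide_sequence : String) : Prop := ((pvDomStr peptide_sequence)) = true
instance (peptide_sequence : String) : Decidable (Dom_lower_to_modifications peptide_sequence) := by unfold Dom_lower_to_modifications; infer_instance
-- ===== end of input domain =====

-- B replaces A's single index-mutating loop by staged passes: chained replace for the string,
-- two per-character position scans and a two-pointer merge for the modification list. Same outputs, no speed claim.

-- ===== PORT A =====
-- A's for-loop over enumerate(peptide_list): at step i it may append a modification and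
-- overwrite peptide_list[i]; since position i is only written at step i, the loop is the
-- structural recursion below carrying the running index i.
def pvAGo (i : Int) : List Char → List Char × List (Int × String × String)
  | [] => ([], [])
  | aa :: rest =>
    let (cs, ms) := pvAGo (i + 1) rest
    if aa = 'c' then ('C' :: cs, (i, "C", "CAM") :: ms)
    else if aa = 'm' then ('M' :: cs, (i, "M", "Oxidation") :: ms)
    else (aa :: cs, ms)

def lower_to_modifications (peptide_sequence : String) : String × (List (Int × String × String)) :=
  let r := pvAGo 0 peptide_sequence.toList
  (String.ofList r.1, r.2)

-- ===== PORT B =====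
-- s.replace(old, new) for a single character: one full pass
def pvReplace (old new : Char) (l : List Char) : List Char :=
  l.map (fun x => if x = old then new else x)

-- Source B's find-based position scan for one character, carrying the current index
def pvPositions (ch : Char) (i : Int) : List Char → List Int
  | [] => []
  | x :: rest =>
    if x = ch then i :: pvPositions ch (i + 1) rest else pvPositions ch (i + 1) rest

-- Source B's two-pointer merge of the two index-sorted tuple lists
def pvMerge : List (Int × String × String) → List (Int × String × String) → List (Int × String × String)
  | [], ms => ms
  | cs, [] => cs
  | x :: xs, y :: ys =>
    if x.1 < y.1 then x :: pvMerge xs (y :: ys) else y :: pvMerge (x :: xs) ys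

def lower_to_modifications_alt (peptide_sequence : String) : String × (List (Int × String × String)) :=
  let l := peptide_sequence.toList
  let result := pvReplace 'm' 'M' (pvReplace 'c' 'C' l)
  let cs := (pvPositions 'c' 0 l).map (fun i => (i, "C", "CAM"))
  let ms := (pvPositions 'm' 0 l).map (fun i => (i, "M", "Oxidation"))
  (String.ofList result, pvMerge cs ms)

-- ===== PRECONDITION & SPEC =====
def Spec_lower_to_modifications (peptide_sequence : String) (out : String × (List (Int × String × String))) : Prop := out = lower_to_modifications_alt peptide_sequence
instance (peptide_sequence : String) (out : String × (List (Int × String × String))) : Decidable (Spec_lower_to_modifications peptide_sequence out) := by unfold Spec_lower_to_modifications; infer_instance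

-- ===== CLAIM =====
def Claim_equal_lower_to_modifications : Prop := ∀ (peptide_sequence : String), Dom_lower_to_modifications peptide_sequence → Spec_lower_to_modifications peptide_sequence (lower_to_modifications peptide_sequence)

-- ===== LEMMAS AND PROOFS =====
theorem pvPositions_lb (ch : Char) (l : List Char) : ∀ (i : Int) (j : Int),
    j ∈ pvPositions ch i l → i ≤ j := by
  induction l with
  | nil => intro i j h; simp [pvPositions] at h
  | cons x rest ih =>
    intro i j h
    simp only [pvPositions] at h
    split at h
    · rcases List.mem_cons.mp h with h | h
      · omega
      · have := ih (i + 1) j h; omega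
    · have := ih (i + 1) j h; omega

theorem pvMerge_left (i : Int) (t : String × String) (cs ms : List (Int × String × String))
    (h : ∀ y ∈ ms, i < y.1) :
    pvMerge ((i, t) :: cs) ms = (i, t) :: pvMerge cs ms := by
  cases ms with
  | nil => cases cs <;> simp [pvMerge]
  | cons y ys =>
    have : i < y.1 := h y (List.mem_cons_self ..)
    simp [pvMerge, this]

theorem pvMerge_right (i : Int) (t : String × String) (cs ms : List (Int × String × String))
    (h : ∀ x ∈ cs, i < x.1) :
    pvMerge cs ((i, t) :: ms) = (i, t) :: pvMerge cs ms := by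
  cases cs with
  | nil => simp [pvMerge]
  | cons x xs =>
    have : i < x.1 := h x (List.mem_cons_self ..)
    have hlt : ¬ x.1 < i := by omega
    simp [pvMerge, hlt]

theorem pvAGo_eq (l : List Char) : ∀ (i : Int),
    pvAGo i l = (pvReplace 'm' 'M' (pvReplace 'c' 'C' l),
      pvMerge ((pvPositions 'c' i l).map (fun j => (j, "C", "CAM")))
              ((pvPositions 'm' i l).map (fun j => (j, "M", "Oxidation")))) := by
  induction l with
  | nil => intro i; simp [pvAGo, pvReplace, pvPositions, pvMerge]
  | cons aa rest ih =>
    intro i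
    have hc : ∀ j ∈ pvPositions 'c' (i + 1) rest, i < j := by
      intro j hj; have := pvPositions_lb 'c' rest (i + 1) j hj; omega
    have hm : ∀ j ∈ pvPositions 'm' (i + 1) rest, i < j := by
      intro j hj; have := pvPositions_lb 'm' rest (i + 1) j hj; omega
    by_cases h1 : aa = 'c'
    · have hml : ∀ y ∈ (pvPositions 'm' (i + 1) rest).map
          (fun j => ((j : Int), ("M" : String), ("Oxidation" : String))), i < y.1 := by
        intro y hy
        rcases List.mem_map.mp hy with ⟨j, hj, rfl⟩
        exact hm j hj
      subst h1
      simp only [pvAGo, ih (i + 1), pvPositions, pvReplace, List.map_cons, Char.reduceEq, reduceIte]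
      rw [pvMerge_left _ _ _ _ hml]
    · by_cases h2 : aa = 'm'
      · have hcl : ∀ x ∈ (pvPositions 'c' (i + 1) rest).map
            (fun j => ((j : Int), ("C" : String), ("CAM" : String))), i < x.1 := by
          intro x hx
          rcases List.mem_map.mp hx with ⟨j, hj, rfl⟩
          exact hc j hj
        subst h2
        simp only [pvAGo, ih (i + 1), pvPositions, pvReplace, List.map_cons, Char.reduceEq, reduceIte]
        rw [pvMerge_right _ _ _ _ hcl]
      · simp only [pvAGo, ih (i + 1), pvPositions, pvReplace, List.map_cons, if_neg h1, if_neg h2]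

-- ===== VERDICT =====
theorem lower_to_modifications_spec : Claim_equal_lower_to_modifications := by
  intro s _
  unfold Spec_lower_to_modifications lower_to_modifications lower_to_modifications_alt
  simp [pvAGo_eq]
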